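-- pv_equiv track=rewrite | github.com/robotrocketscience/aelfrice | src/aelfrice/compression.py | _first_sentence_end_outside_fence
-- ===== SOURCE A (Python) =====
-- from typing import Final
--
-- _CODE_FENCE: Final[str] = "```"
--
-- def _first_sentence_end_outside_fence(content: str) -> int | None:
--     """Return the index just past the first `. ` or `.\\n` that falls
--     outside a balanced ``` code fence, or None if none exists."""
--     in_fence = False
--     i = 0
--     n = len(content)
--     while i < n:
--         if content.startswith(_CODE_FENCE, i):
--             in_fence = not in_fence
--             i += len(_CODE_FENCE)
--             continue
--         if not in_fence and content[i] == ".":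
--             nxt = content[i + 1] if i + 1 < n else ""
--             if nxt == " " or nxt == "\n":
--                 return i + 1
--         i += 1
--     return None
-- ===== SOURCE B (Python) =====
-- _CODE_FENCE = "```"
--
-- def _first_sentence_end_outside_fence(content: str) -> int | None:
--     """Split on the fence delimiter; even-indexed segments lie outside a
--     fence, so scan only those for '. ' / '.\n', tracking a running offset."""
--     offset = 0
--     for k, seg in enumerate(content.split(_CODE_FENCE)):
--         if k % 2 == 0:
--             for j in range(len(seg) - 1):
--                 if seg[j] == "." and (seg[j + 1] == " " or seg[j + 1] == "\n"):
--                     return offset + j + 1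
--         offset += len(seg) + 3
--     return None
-- ===== Notes on version B (the rewrite author's own statement) =====
-- stated objective: faster
-- what changed: Replaces the char-by-char scan with an in_fence toggle flag by one split on the fence delimiter followed by an offset walk that scans only the even-indexed (outside-fence) segments for the first period followed by a space or newline; the split runs in C, so B does measurably less interpreted per-character work.
import Mathlib
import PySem

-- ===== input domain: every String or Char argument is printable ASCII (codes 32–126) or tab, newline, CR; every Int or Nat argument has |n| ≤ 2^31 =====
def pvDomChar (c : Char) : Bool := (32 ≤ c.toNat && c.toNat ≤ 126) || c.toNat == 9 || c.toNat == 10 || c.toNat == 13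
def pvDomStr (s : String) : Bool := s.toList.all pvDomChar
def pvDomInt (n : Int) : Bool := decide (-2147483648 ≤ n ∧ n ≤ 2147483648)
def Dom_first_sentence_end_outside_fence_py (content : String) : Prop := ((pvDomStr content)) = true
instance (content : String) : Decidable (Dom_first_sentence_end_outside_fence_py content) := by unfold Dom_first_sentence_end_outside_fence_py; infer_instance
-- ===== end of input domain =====

-- B replaces A's char-by-char fence-toggle scan by one split on the fence delimiter
-- followed by an offset walk over the even-indexed (outside-fence) segments; the
-- timing run measured B faster (the split runs at C level in CPython).

-- ===== PORT A =====
-- the "```" constant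
def pvFence : List Char := ['`','`','`']

-- A's while loop: position i, fence flag inF, remaining characters (the suffix at i);
-- `nxt = content[i+1] if i+1 < n else ""` becomes rest.head? (the "" compares unequal
-- to ' ' and '\n' exactly as head? = none does)
def pvGoA (inF : Bool) (i : Nat) : List Char → Option Int
  | [] => none
  | c :: rest =>
    if pvFence.isPrefixOf (c :: rest) then
      pvGoA (!inF) (i + 3) ((c :: rest).drop 3)
    else if inF = false && c == '.' then
      (if rest.head? == some ' ' || rest.head? == some '\n' then some ((i : Int) + 1)
       else pvGoA inF (i + 1) rest)
    else pvGoA inF (i + 1) rest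
termination_by l => l.length
decreasing_by all_goals (simp; try omega)

def first_sentence_end_outside_fence_py (content : String) : Option Int :=
  pvGoA false 0 content.toList

-- ===== PORT B =====
-- Source B's inner loop: first j with seg[j] = '.' and seg[j+1] in {' ','\n'}
def pvFindDot (j : Nat) : List Char → Option Nat
  | c :: d :: rest =>
    if c == '.' && (d == ' ' || d == '\n') then some j else pvFindDot (j + 1) (d :: rest)
  | _ => none

-- Source B's outer loop over enumerate(content.split("```")) with running offset
def pvGoB (k : Nat) (offset : Nat) : List (List Char) → Option Int
  | [] => none
  | seg :: rest =>
    match (if k % 2 == 0 then pvFindDot 0 seg else none) with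
    | some j => some ((offset + j + 1 : Nat) : Int)
    | none => pvGoB (k + 1) (offset + seg.length + 3) rest

def first_sentence_end_outside_fence_py_alt (content : String) : Option Int :=
  pvGoB 0 0 (PySem.Chars.splitOn content.toList pvFence)

-- ===== PRECONDITION & SPEC =====
def Spec_first_sentence_end_outside_fence_py (content : String) (out : Option Int) : Prop := out = first_sentence_end_outside_fence_py_alt content
instance (content : String) (out : Option Int) : Decidable (Spec_first_sentence_end_outside_fence_py content out) := by unfold Spec_first_sentence_end_outside_fence_py; infer_instance

-- ===== CLAIM (what is proved, stated in full; the proofs are below) =====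
def Claim_equal_first_sentence_end_outside_fence_py : Prop := ∀ (content : String), Dom_first_sentence_end_outside_fence_py content → Spec_first_sentence_end_outside_fence_py content (first_sentence_end_outside_fence_py content)

-- ===== LEMMAS AND PROOFS =====

-- one-step equations for the ports
theorem pvGoB_nil (k offset : Nat) : pvGoB k offset [] = none := by rw [pvGoB.eq_def]

theorem pvGoB_cons (k offset : Nat) (seg : List Char) (rest : List (List Char)) :
    pvGoB k offset (seg :: rest) =
      match (if k % 2 == 0 then pvFindDot 0 seg else none) with
      | some j => some ((offset + j + 1 : Nat) : Int)
      | none => pvGoB (k + 1) (offset + seg.length + 3) rest := by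
  rw [pvGoB.eq_def]

theorem pvGoA_nil (inF : Bool) (i : Nat) : pvGoA inF i [] = none := by rw [pvGoA]

theorem pvGoA_cons (inF : Bool) (i : Nat) (c : Char) (rest : List Char) :
    pvGoA inF i (c :: rest) =
      if pvFence.isPrefixOf (c :: rest) then pvGoA (!inF) (i + 3) ((c :: rest).drop 3)
      else if inF = false && c == '.' then
        (if rest.head? == some ' ' || rest.head? == some '\n' then some ((i : Int) + 1)
         else pvGoA inF (i + 1) rest)
      else pvGoA inF (i + 1) rest := by
  rw [pvGoA]

-- clean recursive characterisation of splitOn on the fence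
def pvSpl : List Char → List (List Char)
  | [] => [[]]
  | c :: rest =>
    if pvFence.isPrefixOf (c :: rest) then [] :: pvSpl ((c :: rest).drop 3)
    else
      match pvSpl rest with
      | hd :: tl => (c :: hd) :: tl
      | [] => [[c]]
termination_by l => l.length
decreasing_by all_goals (simp; try omega)

theorem pvSpl_nil : pvSpl [] = [[]] := by rw [pvSpl]

theorem pvSpl_cons (c : Char) (rest : List Char) :
    pvSpl (c :: rest) =
      if pvFence.isPrefixOf (c :: rest) then [] :: pvSpl ((c :: rest).drop 3)
      else
        match pvSpl rest with
        | hd :: tl => (c :: hd) :: tl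
        | [] => [[c]] := by
  rw [pvSpl]

theorem pvSpl_ne_nil (l : List Char) : pvSpl l ≠ [] := by
  cases l with
  | nil => simp [pvSpl_nil]
  | cons c rest =>
    rw [pvSpl_cons]
    split_ifs with h
    · simp
    · cases pvSpl rest <;> simp

theorem pvGo_spec (fuel : Nat) : ∀ (l : List Char) (cur : List Char)
    (acc : List (List Char)), l.length < fuel →
    PySem.Chars.splitOn.go pvFence fuel l cur acc =
      acc.reverse ++ (match pvSpl l with
        | hd :: tl => (cur.reverse ++ hd) :: tl
        | [] => []) := by
  induction fuel with
  | zero => intro l cur acc h; omega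
  | succ fuel ih =>
    intro l cur acc h
    match l with
    | [] =>
      simp [PySem.Chars.splitOn.go, pvSpl_nil]
    | c :: rest =>
      have h' : rest.length + 1 < fuel + 1 := by simpa using h
      by_cases hp : pvFence.isPrefixOf (c :: rest)
      · have hlen3 : 3 ≤ (c :: rest).length := by
          have := List.IsPrefix.length_le (List.isPrefixOf_iff_prefix.mp hp)
          simpa [pvFence] using this
        have hrec := ih ((c :: rest).drop 3) [] (cur.reverse :: acc) (by simp; omega)
        rw [show (fuel + 1) = Nat.succ fuel from rfl]
        simp only [PySem.Chars.splitOn.go, hp, if_true]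
        simp only [show pvFence.length = 3 from rfl]
        rw [hrec]
        obtain ⟨hd, tl, hsp⟩ : ∃ hd tl, pvSpl ((c :: rest).drop 3) = hd :: tl := by
          cases hh : pvSpl ((c :: rest).drop 3) with
          | nil => exact absurd hh (pvSpl_ne_nil _)
          | cons a b => exact ⟨a, b, rfl⟩
        rw [pvSpl_cons]
        simp only [hp, if_true]
        rw [hsp]
        simp
      · have hrec := ih rest (c :: cur) acc (by omega)
        rw [show (fuel + 1) = Nat.succ fuel from rfl]
        simp only [PySem.Chars.splitOn.go, hp, if_false, Bool.false_eq_true]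
        rw [hrec]
        rw [pvSpl_cons]
        simp only [hp, if_false, Bool.false_eq_true]
        obtain ⟨hd, tl, hsp⟩ : ∃ hd tl, pvSpl rest = hd :: tl := by
          cases hh : pvSpl rest with
          | nil => exact absurd hh (pvSpl_ne_nil _)
          | cons a b => exact ⟨a, b, rfl⟩
        rw [hsp]
        simp

theorem pvSplitOn_eq_spl (l : List Char) : PySem.Chars.splitOn l pvFence = pvSpl l := by
  have h := pvGo_spec (l.length + 1) l [] [] (by omega)
  obtain ⟨hd, tl, hsp⟩ : ∃ hd tl, pvSpl l = hd :: tl := by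
    cases hh : pvSpl l with
    | nil => exact absurd hh (pvSpl_ne_nil _)
    | cons a b => exact ⟨a, b, rfl⟩
  rw [hsp] at h
  simpa [PySem.Chars.splitOn, hsp] using h

-- the head segment of pvSpl starts with the first character of its input
theorem pvSpl_head (rest : List Char) (d : Char) (h2 : List Char)
    (tl : List (List Char)) (h : pvSpl rest = (d :: h2) :: tl) :
    ∃ r', rest = d :: r' := by
  match rest with
  | [] => rw [pvSpl_nil] at h; simp at h
  | c :: r' =>
    rw [pvSpl_cons] at h
    split_ifs at h with hp
    · simp at h
    · refine ⟨r', ?_⟩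
      cases hh : pvSpl r' with
      | nil => exact absurd hh (pvSpl_ne_nil _)
      | cons a b => rw [hh] at h; simp at h; simp [h.1.1]

-- if the head segment is empty, the input is empty or starts the fence
theorem pvSpl_head_nil (rest : List Char) (tl : List (List Char))
    (h : pvSpl rest = [] :: tl) : rest = [] ∨ ∃ r', rest = '`' :: r' := by
  match rest with
  | [] => exact Or.inl rfl
  | c :: r' =>
    rw [pvSpl_cons] at h
    split_ifs at h with hp
    · have := List.isPrefixOf_iff_prefix.mp hp
      rcases this with ⟨t, ht⟩
      simp [pvFence] at ht
      exact Or.inr ⟨r', by simp [← ht.1]⟩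
    · cases hh : pvSpl r' with
      | nil => exact absurd hh (pvSpl_ne_nil _)
      | cons a b => rw [hh] at h; simp at h

-- index-shift of the inner scan
theorem pvFindDot_shift (l : List Char) : ∀ j, pvFindDot j l = (pvFindDot 0 l).map (j + ·) := by
  induction l with
  | nil => intro j; simp [pvFindDot]
  | cons c rest ih =>
    intro j
    match rest with
    | [] => simp [pvFindDot]
    | d :: r =>
      rw [pvFindDot, pvFindDot]
      split_ifs with h
      · simp
      · rw [ih (j + 1), ih 1]
        cases pvFindDot 0 (d :: r) <;> simp <;> omega

-- parity flip of the fence flag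
theorem pvFlip (k : Nat) : (!(k % 2 == 1)) = ((k + 1) % 2 == 1) := by
  rcases Nat.even_or_odd k with he | ho
  · have h0 : k % 2 = 0 := Nat.even_iff.mp he
    simp [h0, Nat.add_mod]
  · have h1 : k % 2 = 1 := Nat.odd_iff.mp ho
    simp [h1, Nat.add_mod]

-- the main invariant: A's toggle scan at position i with flag (k % 2 == 1)
-- equals B's segment walk, at offset i and segment index k, over pvSpl of the
-- remaining characters
theorem pvMain (n : Nat) : ∀ (l : List Char), l.length ≤ n → ∀ (i k : Nat),
    pvGoA (k % 2 == 1) i l = pvGoB k i (pvSpl l) := by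
  induction n with
  | zero =>
    intro l hl i k
    have h0 : l = [] := by cases l with
      | nil => rfl
      | cons a b => simp at hl
    subst h0
    rw [pvSpl_nil, pvGoA_nil, pvGoB_cons]
    cases hk : k % 2 == 0 <;> simp [hk, pvFindDot, pvGoB_cons, pvGoB_nil]
  | succ n ih =>
    intro l hl i k
    match l with
    | [] =>
      rw [pvSpl_nil, pvGoA_nil, pvGoB_cons]
      cases hk : k % 2 == 0 <;> simp [hk, pvFindDot, pvGoB_cons, pvGoB_nil]
    | c :: rest =>
      have hl' : rest.length ≤ n := by simpa using hl
      by_cases hp : pvFence.isPrefixOf (c :: rest)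
      · -- fence at the cursor: A toggles, B emits the empty segment
        rw [pvGoA_cons, pvSpl_cons]
        simp only [hp, if_true]
        rw [pvGoB_cons]
        have hnone : (if (k % 2 == 0) = true then pvFindDot 0 [] else none) = none := by
          cases k % 2 == 0 <;> simp [pvFindDot]
        rw [hnone]
        have hIH := ih ((c :: rest).drop 3) (by simp; omega) (i + 3) (k + 1)
        rw [pvFlip k, hIH]
        norm_num
      · -- ordinary character
        obtain ⟨hd, tl, hsp⟩ : ∃ hd tl, pvSpl rest = hd :: tl := by
          cases hh : pvSpl rest with
          | nil => exact absurd hh (pvSpl_ne_nil _)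
          | cons a b => exact ⟨a, b, rfl⟩
        have hIH : pvGoA (k % 2 == 1) (i + 1) rest = pvGoB k (i + 1) (hd :: tl) := by
          rw [ih rest hl' (i + 1) k, hsp]
        rw [pvGoA_cons, pvSpl_cons]
        simp only [hp, if_false, Bool.false_eq_true, hsp]
        rw [pvGoB_cons]
        cases hk : k % 2 == 0
        · -- inside a fence (k odd): A skips the char, B skips the whole segment
          have hk1 : (k % 2 == 1) = true := by
            cases h2 : k % 2 with
            | zero => simp [h2] at hk
            | succ m => have : k % 2 < 2 := Nat.mod_lt _ (by norm_num)
                        simp [h2] at hk ⊢ <;> omega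
          simp only [hk, Bool.false_eq_true, if_false, hk1]
          simp only [show decide (true = false) = false by simp, Bool.false_and,
            Bool.false_eq_true, if_false]
          rw [hk1] at hIH
          rw [hIH, pvGoB_cons]
          simp only [hk, Bool.false_eq_true, if_false]
          congr 1
          simp; omega
        · -- outside a fence (k even)
          have hk1 : (k % 2 == 1) = false := by
            simp at hk; simp [hk]
          simp only [hk, if_true, hk1, show decide (false = false) = true by simp,
            Bool.true_and]
          rw [hk1] at hIH
          match hd with
          | [] =>
            -- empty head segment: the next char (if any) opens a fence, so
            -- neither side can match at c
            have hno : (rest.head? == some ' ' || rest.head? == some '\n') = false := by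
              rcases pvSpl_head_nil rest tl hsp with h0 | ⟨r', h0⟩ <;> subst h0 <;> simp
            have hB : pvFindDot 0 [c] = none := by simp [pvFindDot]
            rw [hB]
            by_cases hc : (c == '.') = true
            · simp only [hc, if_true, hno, Bool.false_eq_true, if_false]
              rw [hIH, pvGoB_cons]
              rw [show (if (k % 2 == 0) = true then pvFindDot 0 ([] : List Char)
                  else none) = none by simp [hk, pvFindDot]]
              congr 1 <;> simp <;> try omega
            · simp only [hc, Bool.false_eq_true, if_false]
              rw [hIH, pvGoB_cons]
              rw [show (if (k % 2 == 0) = true then pvFindDot 0 ([] : List Char)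
                  else none) = none by simp [hk, pvFindDot]]
              congr 1 <;> simp <;> try omega
          | d :: h2 =>
            -- the segment continues: its second char is rest's first char
            obtain ⟨r', hr⟩ := pvSpl_head rest d h2 tl hsp
            have hhead : rest.head? = some d := by rw [hr]; rfl
            rw [pvFindDot]
            by_cases hm : (c == '.' && (d == ' ' || d == '\n')) = true
            · -- a sentence end right here
              have hc : (c == '.') = true := by simp at hm ⊢; exact hm.1
              have hdv : (d == ' ' || d == '\n') = true := by
                simp at hm ⊢; rcases hm.2 with h | h <;> simp [h]
              have hdv' : (rest.head? == some ' ' || rest.head? == some '\n') = true := by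
                rw [hhead]; simpa using hdv
              simp only [hm, if_true, hc, hdv']
              simp [hdv] <;> try omega
            · -- no match at c: both sides step one char
              have hmF : (c == '.' && (d == ' ' || d == '\n')) = false := by
                simpa using hm
              have hm' : (rest.head? == some ' ' || rest.head? == some '\n') = false
                  ∨ (c == '.') = false := by
                by_cases hc : (c == '.') = true
                · left
                  rw [hhead]
                  simp only [hc, true_and] at hmF
                  simp at hmF ⊢
                  constructor <;> intro hh <;> subst hh <;> simp at hmF
                · right; simpa using hc
              have hred :
                  (if (decide True && c == '.') = true then
                    (if (rest.head? == some ' ' || rest.head? == some '\n') = true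
                     then some ((i : Int) + 1) else pvGoA false (i + 1) rest)
                   else pvGoA false (i + 1) rest) = pvGoA false (i + 1) rest := by
                rcases hm' with h | h
                · by_cases hc : (c == '.') = true <;> simp [hc, h]
                · simp [h]
              rw [hred, hIH, pvGoB_cons]
              simp only [hk, if_true, hmF, Bool.false_eq_true, if_false]
              rw [pvFindDot_shift (d :: h2) (0 + 1)]
              cases hfd : pvFindDot 0 (d :: h2) with
              | none =>
                simp only [hfd, Option.map_none]
                congr 1 <;> simp <;> try omega
              | some j =>
                simp only [hfd, Option.map_some]
                simp <;> try omega

-- ===== VERDICT (by name: the statement is the Claim_ definition above) =====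
theorem first_sentence_end_outside_fence_py_spec : Claim_equal_first_sentence_end_outside_fence_py := by
  intro content _
  unfold Spec_first_sentence_end_outside_fence_py
  unfold first_sentence_end_outside_fence_py first_sentence_end_outside_fence_py_alt
  rw [pvSplitOn_eq_spl]
  have h := pvMain content.toList.length content.toList le_rfl 0 0
  simpa using h
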